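-- pv_equiv track=rewrite | github.com/patrikmokrusa/ISJ-projects | projekt3/isj_proj3_xmokrup00.py | first_odd_or_even
-- ===== SOURCE A (Python) =====
-- def first_odd_or_even(numbers):
--
--     """Returns 0 if there is the same number of even numbers and odd numbers
--        in the input list of ints, or there are only odd or only even numbers.
--        Returns the first odd number in the input list if the list has more even
--        numbers.
--        Returns the first even number in the input list if the list has more odd
--        numbers.
--
--     >>> first_odd_or_even([2,4,2,3,6])
--     3
--     >>> first_odd_or_even([3,5,4])
--     4
--     >>> first_odd_or_even([2,4,3,5])
--     0
--     >>> first_odd_or_even([2,4])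
--     0
--     >>> first_odd_or_even([3])
--     0
--     """
--
--     even_counter = 0
--     odd_counter = 0
--     for number in numbers:
--         if number%2 == 0:
--             even_counter += 1
--         elif number%2 == 1:
--             odd_counter += 1
--
--     if (even_counter == 0) or (odd_counter == 0) or (odd_counter == even_counter):
--         return 0
--     elif even_counter > odd_counter:
--         for number in numbers:
--             if number%2 == 1:
--                 return number
--     elif odd_counter > even_counter:
--         for number in numbers:
--             if number%2 == 0:
--                 return number
-- ===== SOURCE B (Python) =====
-- def first_odd_or_even(numbers):
--     even_counter = 0
--     odd_counter = 0
--     first_even = None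
--     first_odd = None
--     for number in numbers:
--         if number % 2 == 0:
--             even_counter += 1
--             if first_even is None:
--                 first_even = number
--         elif number % 2 == 1:
--             odd_counter += 1
--             if first_odd is None:
--                 first_odd = number
--     if even_counter == 0 or odd_counter == 0 or even_counter == odd_counter:
--         return 0
--     if even_counter > odd_counter:
--         return first_odd
--     return first_even
-- ===== Notes on version B (the rewrite author's own statement) =====
-- stated objective: alternative
-- what changed: Replaces A's two-phase count-then-rescan (a second pass over the list to find the first odd/even) with a single pass that maintains counters plus the first even and first odd elements, deciding from that state alone.
import Mathlib
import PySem

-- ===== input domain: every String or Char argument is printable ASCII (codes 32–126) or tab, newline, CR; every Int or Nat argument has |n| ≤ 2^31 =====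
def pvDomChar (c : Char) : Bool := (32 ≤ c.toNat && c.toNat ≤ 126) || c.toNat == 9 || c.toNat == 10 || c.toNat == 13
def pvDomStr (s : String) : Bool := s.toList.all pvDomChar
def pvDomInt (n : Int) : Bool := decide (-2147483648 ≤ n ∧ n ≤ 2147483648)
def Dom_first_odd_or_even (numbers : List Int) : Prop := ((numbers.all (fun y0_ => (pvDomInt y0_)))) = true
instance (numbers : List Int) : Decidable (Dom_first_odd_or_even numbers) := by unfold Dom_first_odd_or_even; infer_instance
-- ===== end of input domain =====

-- B replaces A's count-then-rescan with one pass that also records the first even/odd element (alternative decomposition, same cost).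


-- ===== PORT A =====
-- A's second loop "for number in numbers: if number%2 == 1: return number";
-- the [] base returns 0 (unreachable: A only runs this loop when an odd element exists).
def foeFindOdd : List Int → Int
  | [] => 0
  | n :: t => if PySem.Int.mod n 2 = 1 then n else foeFindOdd t

-- A's third loop, first even element (same unreachable base).
def foeFindEven : List Int → Int
  | [] => 0
  | n :: t => if PySem.Int.mod n 2 = 0 then n else foeFindEven t

def first_odd_or_even (numbers : List Int) : Int :=
  let s := numbers.foldl (fun (p : Int × Int) n =>
    if PySem.Int.mod n 2 = 0 then (p.1 + 1, p.2)
    else if PySem.Int.mod n 2 = 1 then (p.1, p.2 + 1)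
    else p) (0, 0)
  if s.1 = 0 ∨ s.2 = 0 ∨ s.2 = s.1 then 0
  else if s.1 > s.2 then foeFindOdd numbers
  else if s.2 > s.1 then foeFindEven numbers
  else 0  -- Python falls off the function (unreachable for lists of ints)

-- ===== PORT B =====
def first_odd_or_even_alt (numbers : List Int) : Int :=
  let s := numbers.foldl (fun (st : Int × Int × Option Int × Option Int) n =>
    if PySem.Int.mod n 2 = 0 then
      (st.1 + 1, st.2.1, (if st.2.2.1 = none then some n else st.2.2.1), st.2.2.2)
    else if PySem.Int.mod n 2 = 1 then
      (st.1, st.2.1 + 1, st.2.2.1, (if st.2.2.2 = none then some n else st.2.2.2))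
    else st) (0, 0, none, none)
  if s.1 = 0 ∨ s.2.1 = 0 ∨ s.1 = s.2.1 then 0
  else if s.1 > s.2.1 then (s.2.2.2).getD 0
  else (s.2.2.1).getD 0

-- ===== PRECONDITION & SPEC =====
def Spec_first_odd_or_even (numbers : List Int) (out : Int) : Prop := out = first_odd_or_even_alt numbers
instance (numbers : List Int) (out : Int) : Decidable (Spec_first_odd_or_even numbers out) := by unfold Spec_first_odd_or_even; infer_instance

-- ===== CLAIM (what is proved, stated in full; the proofs are below) =====
def Claim_equal_first_odd_or_even : Prop := ∀ (numbers : List Int), Dom_first_odd_or_even numbers → Spec_first_odd_or_even numbers (first_odd_or_even numbers)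

-- ===== LEMMAS AND PROOFS =====

-- pure characterisations of both loops
def foeCntE : List Int → Int
  | [] => 0
  | n :: t => (if PySem.Int.mod n 2 = 0 then 1 else 0) + foeCntE t

def foeCntO : List Int → Int
  | [] => 0
  | n :: t => (if PySem.Int.mod n 2 = 0 then 0 else if PySem.Int.mod n 2 = 1 then 1 else 0) + foeCntO t

def foeFE : List Int → Option Int
  | [] => none
  | n :: t => if PySem.Int.mod n 2 = 0 then some n else foeFE t

def foeFO : List Int → Option Int
  | [] => none
  | n :: t => if PySem.Int.mod n 2 = 0 then foeFO t else if PySem.Int.mod n 2 = 1 then some n else foeFO t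

def foeMerge : Option Int → Option Int → Option Int
  | some x, _ => some x
  | none, y => y

theorem foldA_eq (l : List Int) : ∀ ec oc : Int,
    l.foldl (fun (p : Int × Int) n =>
      if PySem.Int.mod n 2 = 0 then (p.1 + 1, p.2)
      else if PySem.Int.mod n 2 = 1 then (p.1, p.2 + 1)
      else p) (ec, oc) = (ec + foeCntE l, oc + foeCntO l) := by
  induction l with
  | nil => intro ec oc; simp [foeCntE, foeCntO]
  | cons n t ih =>
    intro ec oc
    simp only [List.foldl, foeCntE, foeCntO]
    by_cases h0 : PySem.Int.mod n 2 = 0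
    · rw [if_pos h0, if_pos h0, if_pos h0, ih]
      simp only [Prod.mk.injEq]; omega
    · by_cases h1 : PySem.Int.mod n 2 = 1
      · rw [if_neg h0, if_neg h0, if_neg h0, if_pos h1, if_pos h1, ih]
        simp only [Prod.mk.injEq]; omega
      · rw [if_neg h0, if_neg h0, if_neg h0, if_neg h1, if_neg h1, ih]
        simp only [Prod.mk.injEq]; omega

theorem foldB_eq (l : List Int) : ∀ (ec oc : Int) (fe fo : Option Int),
    l.foldl (fun (st : Int × Int × Option Int × Option Int) n =>
      if PySem.Int.mod n 2 = 0 then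
        (st.1 + 1, st.2.1, (if st.2.2.1 = none then some n else st.2.2.1), st.2.2.2)
      else if PySem.Int.mod n 2 = 1 then
        (st.1, st.2.1 + 1, st.2.2.1, (if st.2.2.2 = none then some n else st.2.2.2))
      else st) (ec, oc, fe, fo)
    = (ec + foeCntE l, oc + foeCntO l, foeMerge fe (foeFE l), foeMerge fo (foeFO l)) := by
  induction l with
  | nil =>
    intro ec oc fe fo
    cases fe <;> cases fo <;> simp [foeCntE, foeCntO, foeFE, foeFO, foeMerge]
  | cons n t ih =>
    intro ec oc fe fo
    simp only [List.foldl, foeCntE, foeCntO, foeFE, foeFO]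
    by_cases h0 : PySem.Int.mod n 2 = 0
    · rw [if_pos h0, if_pos h0, if_pos h0, if_pos h0, if_pos h0, ih]
      simp only [Prod.mk.injEq]
      refine ⟨by omega, by omega, ?_, trivial⟩
      cases fe <;> simp [foeMerge]
    · by_cases h1 : PySem.Int.mod n 2 = 1
      · rw [if_neg h0, if_neg h0, if_neg h0, if_neg h0, if_neg h0, if_pos h1, if_pos h1, if_pos h1, ih]
        simp only [Prod.mk.injEq]
        refine ⟨by omega, by omega, trivial, ?_⟩
        cases fo <;> simp [foeMerge]
      · rw [if_neg h0, if_neg h0, if_neg h0, if_neg h0, if_neg h0, if_neg h1, if_neg h1, if_neg h1, ih]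
        simp only [Prod.mk.injEq]
        exact ⟨by omega, by omega, trivial⟩

theorem foeCntO_nonneg (l : List Int) : 0 ≤ foeCntO l := by
  induction l with
  | nil => simp [foeCntO]
  | cons n t ih => simp only [foeCntO]; split_ifs <;> omega

theorem foeCntE_nonneg (l : List Int) : 0 ≤ foeCntE l := by
  induction l with
  | nil => simp [foeCntE]
  | cons n t ih => simp only [foeCntE]; split_ifs <;> omega

theorem foeFO_of_pos (l : List Int) (h : 0 < foeCntO l) : foeFO l = some (foeFindOdd l) := by
  induction l with
  | nil => simp [foeCntO] at h
  | cons n t ih =>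
    simp only [foeFO, foeFindOdd]
    by_cases h0 : PySem.Int.mod n 2 = 0
    · have h1 : ¬ PySem.Int.mod n 2 = 1 := by rw [h0]; decide
      have ht : 0 < foeCntO t := by
        simp only [foeCntO, if_pos h0] at h; omega
      rw [if_pos h0, if_neg h1, ih ht]
    · by_cases h1 : PySem.Int.mod n 2 = 1
      · rw [if_neg h0, if_pos h1, if_pos h1]
      · have ht : 0 < foeCntO t := by
          simp only [foeCntO, if_neg h0, if_neg h1] at h; omega
        rw [if_neg h0, if_neg h1, if_neg h1, ih ht]

theorem foeFE_of_pos (l : List Int) (h : 0 < foeCntE l) : foeFE l = some (foeFindEven l) := by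
  induction l with
  | nil => simp [foeCntE] at h
  | cons n t ih =>
    simp only [foeFE, foeFindEven]
    by_cases h0 : PySem.Int.mod n 2 = 0
    · rw [if_pos h0, if_pos h0]
    · have ht : 0 < foeCntE t := by
        simp only [foeCntE, if_neg h0] at h; omega
      rw [if_neg h0, if_neg h0, ih ht]

-- ===== VERDICT (by name: the statement is the Claim_ definition above) =====
theorem first_odd_or_even_spec : Claim_equal_first_odd_or_even := by
  intro numbers _
  unfold Spec_first_odd_or_even first_odd_or_even first_odd_or_even_alt
  rw [foldA_eq, foldB_eq]
  simp only [foeMerge, zero_add]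
  have hE := foeCntE_nonneg numbers
  have hO := foeCntO_nonneg numbers
  by_cases hc : foeCntE numbers = 0 ∨ foeCntO numbers = 0 ∨ foeCntO numbers = foeCntE numbers
  · have hcB : foeCntE numbers = 0 ∨ foeCntO numbers = 0 ∨ foeCntE numbers = foeCntO numbers := by omega
    rw [if_pos hc, if_pos hcB]
  · have hcB : ¬ (foeCntE numbers = 0 ∨ foeCntO numbers = 0 ∨ foeCntE numbers = foeCntO numbers) := by omega
    rw [if_neg hc, if_neg hcB]
    by_cases hgt : foeCntE numbers > foeCntO numbers
    · rw [if_pos hgt, if_pos hgt, foeFO_of_pos numbers (by omega), Option.getD_some]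
    · have hlt : foeCntO numbers > foeCntE numbers := by omega
      rw [if_neg hgt, if_neg hgt, if_pos hlt, foeFE_of_pos numbers (by omega), Option.getD_some]
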